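-- pv_equiv track=rewrite | github.com/yizhangphd/FreqPCR | setup.py | get_existing_ccbin
-- ===== SOURCE A (Python) =====
-- from typing import List
-- from typing import List, Optional
--
-- def get_existing_ccbin(nvcc_args: List[str]) -> Optional[str]:
--     """
--     Given a list of nvcc arguments, return the compiler if specified.
--
--     Note from CUDA doc: Single value options and list options must have
--     arguments, which must follow the name of the option itself by either
--     one of more spaces or an equals character.
--     """
--     last_arg = None
--     for arg in reversed(nvcc_args):
--         if arg == "-ccbin":
--             return last_arg
--         if arg.startswith("-ccbin="):
--             return arg[7:]
--         last_arg = arg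
--     return None
-- ===== SOURCE B (Python) =====
-- from typing import List, Optional
--
--
-- def get_existing_ccbin(nvcc_args: List[str]) -> Optional[str]:
--     """Forward single pass: keep the value of the last -ccbin option seen."""
--     result = None
--     n = len(nvcc_args)
--     for i, arg in enumerate(nvcc_args):
--         if arg == "-ccbin":
--             result = nvcc_args[i + 1] if i + 1 < n else None
--         elif arg.startswith("-ccbin="):
--             result = arg[7:]
--     return result
-- ===== Notes on version B (the rewrite author's own statement) =====
-- stated objective: idiomatic
-- what changed: Replaced the reversed-iteration scan with a trailing-argument accumulator and early returns by a forward enumerate pass with index lookahead that keeps the last match and returns once at the end.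
import Mathlib
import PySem

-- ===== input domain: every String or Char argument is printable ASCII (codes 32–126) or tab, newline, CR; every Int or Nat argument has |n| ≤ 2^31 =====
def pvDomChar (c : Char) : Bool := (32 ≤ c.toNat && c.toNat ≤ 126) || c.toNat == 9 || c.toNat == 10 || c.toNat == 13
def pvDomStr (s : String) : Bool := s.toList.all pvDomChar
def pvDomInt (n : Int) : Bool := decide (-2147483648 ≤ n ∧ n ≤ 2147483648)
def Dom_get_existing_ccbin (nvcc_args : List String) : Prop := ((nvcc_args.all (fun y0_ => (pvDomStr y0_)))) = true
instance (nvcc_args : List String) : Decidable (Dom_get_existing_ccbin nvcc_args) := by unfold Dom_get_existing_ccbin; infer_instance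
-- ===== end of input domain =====

-- B replaces A's reversed scan with early returns by a forward enumerate pass with
-- index lookahead keeping the last match (idiomatic decomposition; same O(n) cost).

-- ===== PORT A =====
-- A's loop over reversed(nvcc_args) with the trailing `last_arg` accumulator and early returns.
def ccbinScanRev (last_arg : Option String) : List String → Option String
  | [] => none
  | arg :: rest =>
    if arg = "-ccbin" then last_arg
    else if PySem.Str.startswith arg "-ccbin=" then some (PySem.Str.slice arg (some 7) none)
    else ccbinScanRev (some arg) rest

def get_existing_ccbin (nvcc_args : List String) : Option String :=
  ccbinScanRev none nvcc_args.reverse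

-- ===== PORT B =====
-- B's loop body: `result` is overwritten on each match; lookahead nvcc_args[i+1] guarded by i+1 < n.
def ccbinStep (nvcc_args : List String) (result : Option String) (p : Int × String) : Option String :=
  if p.2 = "-ccbin" then
    (if p.1 + 1 < (nvcc_args.length : Int) then PySem.List.pyGet? nvcc_args (p.1 + 1) else none)
  else if PySem.Str.startswith p.2 "-ccbin=" then some (PySem.Str.slice p.2 (some 7) none)
  else result

def get_existing_ccbin_alt (nvcc_args : List String) : Option String :=
  (PySem.List.enumerate nvcc_args 0).foldl (ccbinStep nvcc_args) none

-- ===== PRECONDITION & SPEC =====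
def Spec_get_existing_ccbin (nvcc_args : List String) (out : Option String) : Prop := out = get_existing_ccbin_alt nvcc_args
instance (nvcc_args : List String) (out : Option String) : Decidable (Spec_get_existing_ccbin nvcc_args out) := by unfold Spec_get_existing_ccbin; infer_instance

-- ===== CLAIM (what is proved, stated in full; the proofs are below) =====
def Claim_equal_get_existing_ccbin : Prop := ∀ (nvcc_args : List String), Dom_get_existing_ccbin nvcc_args → Spec_get_existing_ccbin nvcc_args (get_existing_ccbin nvcc_args)

-- ===== LEMMAS AND PROOFS =====

-- B's forward fold over a prefix l of l ++ rest computes A's reversed scan of l seeded with rest.head?.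
lemma ccbin_aux (l : List String) : ∀ (rest : List String),
    (PySem.List.enumerate l 0).foldl (ccbinStep (l ++ rest)) none
      = ccbinScanRev rest.head? l.reverse := by
  induction l using List.reverseRecOn with
  | nil => intro rest; simp [PySem.List.enumerate_nil, ccbinScanRev]
  | append_singleton m x ih =>
    intro rest
    have hL : (m ++ [x]) ++ rest = m ++ (x :: rest) := by simp
    rw [hL, PySem.List.enumerate_append, List.foldl_append, ih (x :: rest)]
    simp only [PySem.List.enumerate_cons, PySem.List.enumerate_nil, List.foldl_cons,
      List.foldl_nil, List.reverse_append, List.reverse_singleton, List.singleton_append]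
    show ccbinStep (m ++ (x :: rest)) (ccbinScanRev (some x) m.reverse) (0 + ↑m.length, x)
        = ccbinScanRev rest.head? (x :: m.reverse)
    have hR : ccbinScanRev rest.head? (x :: m.reverse)
        = if x = "-ccbin" then rest.head?
          else if PySem.Str.startswith x "-ccbin=" then some (PySem.Str.slice x (some 7) none)
          else ccbinScanRev (some x) m.reverse := rfl
    rw [hR]
    unfold ccbinStep
    by_cases hx : x = "-ccbin"
    · simp only [hx]
      cases rest with
      | nil =>
        have h1 : ¬ ((0 : Int) + ↑m.length + 1 < ↑(m ++ ["-ccbin"] : List String).length) := by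
          simp
        rw [if_neg h1]; simp
      | cons r t =>
        have hlt : ((0 : Int) + ↑m.length + 1 < ↑(m ++ ("-ccbin" :: r :: t) : List String).length) := by
          simp
        have hcast : (0 : Int) + ↑m.length + 1 = ((m.length + 1 : Nat) : Int) := by push_cast; ring
        rw [if_pos hlt, hcast, PySem.List.pyGet?_natCast]
        have h2 : (m ++ ("-ccbin" :: r :: t))[m.length + 1]? = some r := by
          rw [List.getElem?_append_right (by omega)]
          simp
        rw [h2]; simp
    · simp only [if_neg hx]

-- ===== VERDICT (by name: the statement is the Claim_ definition above) =====
theorem get_existing_ccbin_spec : Claim_equal_get_existing_ccbin := by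
  intro nvcc_args _
  show get_existing_ccbin nvcc_args = get_existing_ccbin_alt nvcc_args
  have h := ccbin_aux nvcc_args []
  rw [List.append_nil] at h
  simp only [get_existing_ccbin, get_existing_ccbin_alt, h, List.head?_nil]
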